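-- pv_equiv track=rewrite | github.com/Shaharafat/Problem-Solving | codeforces/vanya_and_fence.py | calculate_min_width
-- ===== SOURCE A (Python) =====
-- def calculate_min_width(height_of_fence, list_of_height):
--   width = 0
--   for height in list_of_height:
--     if height > height_of_fence:
--       width += 2
--     else:
--       width += 1
--
--   return width
-- ===== SOURCE B (Python) =====
-- def calculate_min_width(height_of_fence, list_of_height):
--   # Sort, then binary-search the boundary between heights <= fence and > fence;
--   # every plank is 1 wide, each of the (n - lo) planks above the fence adds 1 more.
--   s = sorted(list_of_height)
--   n = len(list_of_height)
--   lo, hi = 0, n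
--   while lo < hi:
--     mid = (lo + hi) // 2
--     if s[mid] > height_of_fence:
--       hi = mid
--     else:
--       lo = mid + 1
--   return n + (n - lo)
-- ===== Notes on version B (the rewrite author's own statement) =====
-- stated objective: alternative
-- what changed: Instead of A's single pass accumulating 2-or-1 per element, B sorts the heights and binary-searches the boundary index lo of the last height not exceeding the fence, returning n + (n - lo): the answer is computed from a position in the sorted order, not by scanning.
import Mathlib
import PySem

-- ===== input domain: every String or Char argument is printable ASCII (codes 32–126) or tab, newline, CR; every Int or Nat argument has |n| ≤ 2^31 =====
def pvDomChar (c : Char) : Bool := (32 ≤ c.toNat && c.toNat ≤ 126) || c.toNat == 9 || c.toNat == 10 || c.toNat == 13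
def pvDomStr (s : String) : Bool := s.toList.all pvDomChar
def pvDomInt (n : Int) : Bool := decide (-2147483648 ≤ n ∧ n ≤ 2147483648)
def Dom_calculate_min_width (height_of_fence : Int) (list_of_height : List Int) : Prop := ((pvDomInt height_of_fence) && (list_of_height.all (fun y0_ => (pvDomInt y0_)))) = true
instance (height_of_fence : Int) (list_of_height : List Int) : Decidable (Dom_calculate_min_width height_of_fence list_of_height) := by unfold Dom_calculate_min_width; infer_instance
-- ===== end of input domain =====

-- B replaces A's per-element 2-or-1 accumulation by sorting the heights and binary-searching the
-- boundary index of the planks above the fence, computing the width from that position (alternative).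
-- ===== PORT A =====
def calculate_min_width (height_of_fence : Int) (list_of_height : List Int) : Int :=
  list_of_height.foldl (fun width height => if height > height_of_fence then width + 2 else width + 1) 0

-- ===== PORT B =====
-- the `while lo < hi` binary-search loop of Source B; lo/hi/mid are nonnegative Python ints (Nat);
-- `(lo + hi) // 2` on nonnegative ints is Nat division; `s[mid]` is in range on every call the
-- loop makes (0 ≤ lo ≤ mid < hi ≤ len(s), proved below), so `getD _ 0` reads exactly s[mid].
def bsLoop (height_of_fence : Int) (s : List Int) (lo hi : Nat) : Nat :=
  if _h : lo < hi then
    let mid := (lo + hi) / 2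
    if s.getD mid 0 > height_of_fence then bsLoop height_of_fence s lo mid
    else bsLoop height_of_fence s (mid + 1) hi
  else lo
termination_by hi - lo
decreasing_by all_goals omega

def calculate_min_width_alt (height_of_fence : Int) (list_of_height : List Int) : Int :=
  let s := PySem.List.sorted list_of_height (fun x => x) false
  let n := list_of_height.length
  let lo := bsLoop height_of_fence s 0 n
  (n : Int) + ((n : Int) - (lo : Int))

-- ===== PRECONDITION & SPEC =====
def Spec_calculate_min_width (height_of_fence : Int) (list_of_height : List Int) (out : Int) : Prop := out = calculate_min_width_alt height_of_fence list_of_height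
instance (height_of_fence : Int) (list_of_height : List Int) (out : Int) : Decidable (Spec_calculate_min_width height_of_fence list_of_height out) := by unfold Spec_calculate_min_width; infer_instance

-- ===== CLAIM =====
def Claim_equal_calculate_min_width : Prop := ∀ (height_of_fence : Int) (list_of_height : List Int), Dom_calculate_min_width height_of_fence list_of_height → Spec_calculate_min_width height_of_fence list_of_height (calculate_min_width height_of_fence list_of_height)

-- ===== LEMMAS AND PROOFS =====

-- A's loop: accumulator + length + number of heights strictly above the fence.
lemma cmw_foldl (f : Int) (l : List Int) (acc : Int) :
    l.foldl (fun width height => if height > f then width + 2 else width + 1) acc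
      = acc + (l.length : Int) + (l.countP (fun h => decide (f < h)) : Int) := by
  induction l generalizing acc with
  | nil => simp
  | cons h t ih =>
    simp only [List.foldl_cons, List.countP_cons]
    by_cases hc : f < h
    · simp [hc, ih]; ring
    · simp [hc, ih]; ring

-- monotone reads from a ≤-sorted list
lemma getD_mono (s : List Int) (hs : s.Pairwise (· ≤ ·)) (i j : Nat)
    (hij : i ≤ j) (hj : j < s.length) : s.getD i 0 ≤ s.getD j 0 := by
  rcases Nat.lt_or_ge i j with hlt | hge
  · rw [List.getD_eq_getElem s 0 (lt_trans hlt hj), List.getD_eq_getElem s 0 hj]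
    exact (List.pairwise_iff_getElem.mp hs) i j (lt_trans hlt hj) hj hlt
  · have : i = j := le_antisymm hij hge
    subst this; exact le_refl _

-- invariant of the binary-search loop on a sorted list
lemma bsLoop_correct (f : Int) (s : List Int) (hs : s.Pairwise (· ≤ ·)) :
    ∀ d lo hi, hi - lo = d → lo ≤ hi → hi ≤ s.length →
    (∀ i, i < lo → ¬ f < s.getD i 0) →
    (∀ i, hi ≤ i → i < s.length → f < s.getD i 0) →
    (bsLoop f s lo hi ≤ s.length) ∧
    (∀ i, i < bsLoop f s lo hi → ¬ f < s.getD i 0) ∧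
    (∀ i, bsLoop f s lo hi ≤ i → i < s.length → f < s.getD i 0) := by
  intro d
  induction d using Nat.strong_induction_on with
  | _ d ih =>
    intro lo hi hd hlh hhn hpre hsuf
    rw [bsLoop]
    by_cases hlt : lo < hi
    · simp only [hlt, dif_pos]
      have hmid1 : lo ≤ (lo + hi) / 2 := by omega
      have hmid2 : (lo + hi) / 2 < hi := by omega
      by_cases hc : s.getD ((lo + hi) / 2) 0 > f
      · simp only [hc, if_pos]
        exact ih ((lo + hi) / 2 - lo) (by omega) lo ((lo + hi) / 2) rfl hmid1 (by omega) hpre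
          (fun i hi1 hi2 => lt_of_lt_of_le hc (getD_mono s hs _ i hi1 hi2))
      · simp only [hc, if_neg, not_false_iff]
        refine ih (hi - ((lo + hi) / 2 + 1)) (by omega) ((lo + hi) / 2 + 1) hi rfl (by omega) hhn
          (fun i hi1 => ?_) hsuf
        have h1 : s.getD i 0 ≤ s.getD ((lo + hi) / 2) 0 :=
          getD_mono s hs i _ (by omega) (by omega)
        exact fun hcon => hc (lt_of_lt_of_le hcon h1)
    · simp only [hlt, dif_neg, not_false_iff]
      have : lo = hi := by omega
      subst this
      exact ⟨hhn, hpre, hsuf⟩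

-- a prefix/suffix split point determines the count of heights above the fence
lemma countP_split (f : Int) (s : List Int) (k : Nat) (hk : k ≤ s.length)
    (h1 : ∀ i, i < k → ¬ f < s.getD i 0)
    (h2 : ∀ i, k ≤ i → i < s.length → f < s.getD i 0) :
    s.countP (fun h => decide (f < h)) = s.length - k := by
  have hsplit : s.countP (fun h => decide (f < h))
      = (s.take k).countP (fun h => decide (f < h)) + (s.drop k).countP (fun h => decide (f < h)) := by
    rw [← List.countP_append, List.take_append_drop]
  rw [hsplit]
  have htake : (s.take k).countP (fun h => decide (f < h)) = 0 := by
    rw [List.countP_eq_zero]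
    intro a ha
    obtain ⟨i, hi, hia⟩ := List.mem_iff_getElem.mp ha
    simp only [List.length_take] at hi
    have hik : i < k := by omega
    have hin : i < s.length := by omega
    rw [List.getElem_take] at hia
    have := h1 i hik
    rw [List.getD_eq_getElem s 0 hin] at this
    simp [← hia] at this ⊢
    exact this
  have hdrop : (s.drop k).countP (fun h => decide (f < h)) = (s.drop k).length := by
    rw [List.countP_eq_length]
    intro a ha
    obtain ⟨i, hi, hia⟩ := List.mem_iff_getElem.mp ha
    rw [List.getElem_drop] at hia
    simp only [List.length_drop] at hi
    have hin : k + i < s.length := by omega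
    have := h2 (k + i) (Nat.le_add_right _ _) hin
    rw [List.getD_eq_getElem s 0 hin] at this
    simp [← hia]
    exact this
  rw [htake, hdrop, List.length_drop]
  omega

-- ===== VERDICT =====
theorem calculate_min_width_spec : Claim_equal_calculate_min_width := by
  intro f l _
  unfold Spec_calculate_min_width
  have hperm : (PySem.List.sorted l (fun x => x) false).Perm l := PySem.List.sorted_perm l (fun x => x) false
  have hlen : (PySem.List.sorted l (fun x => x) false).length = l.length := hperm.length_eq
  have hs : (PySem.List.sorted l (fun x => x) false).Pairwise (· ≤ ·) := PySem.List.sorted_pairwise l (fun x => x)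
  obtain ⟨hk, h1, h2⟩ := bsLoop_correct f _ hs l.length 0 l.length (by omega) (by omega)
    (by omega) (by omega) (by intro i hi1 hi2; omega)
  have hcount := countP_split f _ _ hk h1 h2
  have hcl : l.countP (fun h => decide (f < h))
      = (PySem.List.sorted l (fun x => x) false).countP (fun h => decide (f < h)) :=
    (hperm.countP_eq _).symm
  have halt : calculate_min_width_alt f l
      = (l.length : Int) + ((l.length : Int)
        - (bsLoop f (PySem.List.sorted l (fun x => x) false) 0 l.length : Int)) := rfl
  show calculate_min_width f l = calculate_min_width_alt f l
  rw [calculate_min_width, cmw_foldl, halt]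
  omega
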